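-- pv_equiv track=rewrite | github.com/LessieSilver/Tests | main2.py | get_sorted_courses_info
-- ===== SOURCE A (Python) =====
-- def get_sorted_courses_info(courses_list):
--     durations_dict = {}
--     for idx, course in enumerate(courses_list):
--         durations_dict.setdefault(course["duration"], []).append(idx)
--
--     result = []
--     for duration in sorted(durations_dict.keys()):
--         for idx in durations_dict[duration]:
--             title = courses_list[idx]["title"]
--             result.append(f"{title} - {duration} месяцев")
--     return result
-- ===== SOURCE B (Python) =====
-- def get_sorted_courses_info(courses_list):
--     ordered = sorted(courses_list, key=lambda course: course["duration"])
--     return [f"{course['title']} - {course['duration']} месяцев" for course in ordered]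
-- ===== Notes on version B (the rewrite author's own statement) =====
-- stated objective: idiomatic
-- what changed: Replaced the duration->index-bucket dict plus per-key index lookups by one stable sort of the course list itself and a single formatting pass.
import Mathlib
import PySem

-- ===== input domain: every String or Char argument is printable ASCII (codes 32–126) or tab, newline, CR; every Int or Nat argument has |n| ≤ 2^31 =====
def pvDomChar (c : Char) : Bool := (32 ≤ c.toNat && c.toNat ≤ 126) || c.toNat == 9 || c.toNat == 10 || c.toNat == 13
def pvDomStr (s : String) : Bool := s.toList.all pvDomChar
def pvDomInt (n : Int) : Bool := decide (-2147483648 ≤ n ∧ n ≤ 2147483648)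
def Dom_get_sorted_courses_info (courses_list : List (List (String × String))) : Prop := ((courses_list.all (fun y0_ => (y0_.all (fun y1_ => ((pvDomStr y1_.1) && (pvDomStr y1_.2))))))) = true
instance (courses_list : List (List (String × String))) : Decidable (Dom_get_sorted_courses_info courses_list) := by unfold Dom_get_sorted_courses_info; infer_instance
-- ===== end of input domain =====

-- B replaces A's duration->index-bucket dict and per-key index lookups by one stable sort of the
-- course list and a single formatting pass (objective: idiomatic; same asymptotic cost).

-- ===== PORT A =====
-- shared accessors: course["duration"] / course["title"] (dict built from the pair list, Python last-wins)
def pvDur (course : List (String × String)) : String :=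
  PySem.Dict.getD (PySem.Dict.ofList course) "duration" ""
def pvTitle (course : List (String × String)) : String :=
  PySem.Dict.getD (PySem.Dict.ofList course) "title" ""

def get_sorted_courses_info (courses_list : List (List (String × String))) : List String :=
  let durations_dict : PySem.Dict String (List Int) :=
    (PySem.List.enumerate courses_list).foldl
      (fun d p => d.modify (pvDur p.2) [] (fun v => v ++ [p.1])) PySem.Dict.empty
  (PySem.List.sorted durations_dict.keys (fun s => s)).foldl
    (fun result duration =>
      (durations_dict.getD duration []).foldl
        (fun result idx =>
          result ++ [pvTitle (PySem.List.pyGetD courses_list idx []) ++ " - " ++ duration ++ " месяцев"])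
        result)
    []

-- ===== PORT B =====
def get_sorted_courses_info_alt (courses_list : List (List (String × String))) : List String :=
  (PySem.List.sorted courses_list pvDur).map
    (fun course => pvTitle course ++ " - " ++ pvDur course ++ " месяцев")

-- ===== PRECONDITION & SPEC =====
-- Pre_ excludes exactly the inputs where the Python raises KeyError (a course missing the
-- "duration" or "title" key); both A and B raise there.
def Pre_get_sorted_courses_info (courses_list : List (List (String × String))) : Prop :=
  ∀ course ∈ courses_list,
    (PySem.Dict.ofList course).contains "duration" = true ∧
    (PySem.Dict.ofList course).contains "title" = true
instance (courses_list : List (List (String × String))) : Decidable (Pre_get_sorted_courses_info courses_list) := by unfold Pre_get_sorted_courses_info; infer_instance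

def pvWitness_get_sorted_courses_info : (List (List (String × String))) :=
  [[("duration", "3"), ("title", "A")], [("duration", "1"), ("title", "B")]]

def Spec_get_sorted_courses_info (courses_list : List (List (String × String))) (out : List String) : Prop := out = get_sorted_courses_info_alt courses_list
instance (courses_list : List (List (String × String))) (out : List String) : Decidable (Spec_get_sorted_courses_info courses_list out) := by unfold Spec_get_sorted_courses_info; infer_instance

-- ===== CLAIM (what is proved, stated in full; the proofs are below) =====
def Claim_equal_get_sorted_courses_info : Prop := ∀ (courses_list : List (List (String × String))), Dom_get_sorted_courses_info courses_list → Pre_get_sorted_courses_info courses_list → Spec_get_sorted_courses_info courses_list (get_sorted_courses_info courses_list)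

-- ===== LEMMAS AND PROOFS =====

theorem pv_filter_insertBy {α : Type} (k : α → String) (x : α) (d : String) :
    ∀ zs : List α, zs.Pairwise (fun a b => k a ≤ k b) →
      (PySem.List.insertBy (fun a b => decide (k a < k b)) x zs).filter (fun a => k a == d) =
        if k x = d then zs.filter (fun a => k a == d) ++ [x] else zs.filter (fun a => k a == d) := by
  intro zs
  induction zs with
  | nil =>
    intro _
    show List.filter _ [x] = _
    by_cases hd : k x = d <;> simp [hd]
  | cons z zs ih =>
    intro hp
    rw [List.pairwise_cons] at hp
    obtain ⟨hz, hp'⟩ := hp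
    have hcons : PySem.List.insertBy (fun a b => decide (k a < k b)) x (z :: zs) =
        if decide (k x < k z) then x :: z :: zs
        else z :: PySem.List.insertBy (fun a b => decide (k a < k b)) x zs := rfl
    rw [hcons]
    by_cases hlt : k x < k z
    · rw [if_pos (by simpa using hlt)]
      by_cases hd : k x = d
      · have hz' : (z :: zs).filter (fun a => k a == d) = [] := by
          rw [List.filter_eq_nil_iff]
          intro a ha
          simp only [beq_iff_eq]
          intro h
          rcases List.mem_cons.mp ha with rfl | ha'
          · exact absurd (hd ▸ h ▸ hlt) (lt_irrefl _)
          · exact absurd (lt_of_lt_of_le (hd ▸ hlt) (h ▸ hz a ha')) (lt_irrefl _)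
        rw [if_pos hd, List.filter_cons_of_pos (by simp [hd]), hz']
        simp
      · rw [if_neg hd]
        simp [List.filter_cons, hd]
    · rw [if_neg (by simpa using hlt), List.filter_cons, List.filter_cons, ih hp']
      by_cases hd : k x = d <;> by_cases hzd : (k z == d) = true <;> simp [hd, hzd]

theorem pv_filter_sorted {α : Type} (k : α → String) (d : String) (xs : List α) :
    (PySem.List.sorted xs k).filter (fun a => k a == d) = xs.filter (fun a => k a == d) := by
  induction xs using List.reverseRecOn with
  | nil => rfl
  | append_singleton ys x ih =>
    have hs : PySem.List.sorted (ys ++ [x]) k =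
        PySem.List.insertBy (fun a b => decide (k a < k b)) x (PySem.List.sorted ys k) := by
      rw [PySem.List.sorted_eq_foldl_insertBy, PySem.List.sorted_eq_foldl_insertBy, List.foldl_concat]
    rw [hs, pv_filter_insertBy k x d _ (PySem.List.sorted_pairwise ys k), List.filter_append, ih]
    by_cases hd : k x = d <;> simp [hd]

theorem pv_eq_of_sorted_filters {α : Type} (k : α → String) :
    ∀ (ys zs : List α), ys.Pairwise (fun a b => k a ≤ k b) → zs.Pairwise (fun a b => k a ≤ k b) →
      (∀ d, ys.filter (fun a => k a == d) = zs.filter (fun a => k a == d)) → ys = zs := by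
  intro ys
  induction ys with
  | nil =>
    intro zs _ _ h
    cases zs with
    | nil => rfl
    | cons z zs =>
      have := h (k z)
      simp at this
  | cons y ys ih =>
    intro zs hys hzs h
    cases zs with
    | nil =>
      have := h (k y)
      simp at this
    | cons z zs =>
      rw [List.pairwise_cons] at hys hzs
      obtain ⟨hy, hys'⟩ := hys
      obtain ⟨hz, hzs'⟩ := hzs
      have hk : k y = k z := by
        by_contra hne
        rcases lt_or_gt_of_ne hne with hlt | hlt
        · have hm : y ∈ (z :: zs).filter (fun a => k a == k y) := by
            rw [← h (k y)]; simp
          rcases List.mem_cons.mp (List.mem_of_mem_filter hm) with rfl | hm'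
          · exact hne rfl
          · exact absurd (lt_of_lt_of_le hlt (hz y hm')) (lt_irrefl _)
        · have hm : z ∈ (y :: ys).filter (fun a => k a == k z) := by
            rw [h (k z)]; simp
          rcases List.mem_cons.mp (List.mem_of_mem_filter hm) with heq | hm'
          · exact hne (by rw [heq])
          · exact absurd (lt_of_lt_of_le hlt (hy z hm')) (lt_irrefl _)
      have hyz : y = z ∧ ys.filter (fun a => k a == k y) = zs.filter (fun a => k a == k y) := by
        have := h (k y)
        rw [List.filter_cons_of_pos (by simp), List.filter_cons_of_pos (by simp [hk])] at this
        exact ⟨(List.cons.injEq _ _ _ _ ▸ this).1, (List.cons.injEq _ _ _ _ ▸ this).2⟩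
      obtain ⟨rfl, htail⟩ := hyz
      have h' : ∀ d, ys.filter (fun a => k a == d) = zs.filter (fun a => k a == d) := by
        intro d
        by_cases hd : k y = d
        · exact hd ▸ htail
        · have := h d
          rwa [List.filter_cons_of_neg (by simp [hd]), List.filter_cons_of_neg (by simp [hd])] at this
      rw [ih zs hys' hzs' h']

theorem pv_flat_pairwise {α : Type} (k : α → String) (xs : List α) :
    ∀ K : List String, K.Pairwise (· < ·) →
      (K.flatMap (fun d => xs.filter (fun c => k c == d))).Pairwise (fun a b => k a ≤ k b) := by
  intro K
  induction K with
  | nil => intro _; simp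
  | cons d K ih =>
    intro hp
    rw [List.pairwise_cons] at hp
    obtain ⟨hd, hp'⟩ := hp
    rw [List.flatMap_cons, List.pairwise_append]
    refine ⟨?_, ih hp', ?_⟩
    · apply List.Pairwise.imp ?_ (List.pairwise_of_forall_mem_list ?_ : List.Pairwise (fun a b => k a = k b) _)
      · intro a b hab; exact le_of_eq hab
      · intro a ha b hb
        have ha' := (List.mem_filter.mp ha).2
        have hb' := (List.mem_filter.mp hb).2
        simp only [beq_iff_eq] at ha' hb'
        rw [ha', hb']
    · intro a ha b hb
      have ha' := (List.mem_filter.mp ha).2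
      simp only [beq_iff_eq] at ha'
      obtain ⟨e, he, hbe⟩ := List.mem_flatMap.mp hb
      have hb' := (List.mem_filter.mp hbe).2
      simp only [beq_iff_eq] at hb'
      rw [ha', hb']
      exact le_of_lt (hd e he)

theorem pv_filter_flat {α : Type} (k : α → String) (xs : List α) :
    ∀ K : List String, K.Nodup → (∀ c ∈ xs, k c ∈ K) → ∀ d,
      (K.flatMap (fun e => xs.filter (fun c => k c == e))).filter (fun c => k c == d) =
        xs.filter (fun c => k c == d) := by
  have key : ∀ (K : List String), K.Nodup → ∀ d,
      (K.flatMap (fun e => xs.filter (fun c => k c == e))).filter (fun c => k c == d) =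
        if d ∈ K then xs.filter (fun c => k c == d) else [] := by
    intro K
    induction K with
    | nil => intro _ d; simp
    | cons e K ih =>
      intro hnd d
      rw [List.nodup_cons] at hnd
      obtain ⟨hne, hnd'⟩ := hnd
      rw [List.flatMap_cons, List.filter_append, ih hnd' d]
      have hblock : (xs.filter (fun c => k c == e)).filter (fun c => k c == d) =
          if d = e then xs.filter (fun c => k c == d) else [] := by
        by_cases hde : d = e
        · subst hde; simp [List.filter_filter]
        · rw [List.filter_eq_nil_iff.mpr, if_neg hde]
          intro a ha
          have := (List.mem_filter.mp ha).2
          simp only [beq_iff_eq] at this ⊢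
          rw [this]; exact fun h => hde h.symm
      rw [hblock]
      by_cases hde : d = e
      · subst hde
        simp [hne]
      · simp only [List.mem_cons]
        by_cases hdK : d ∈ K <;> simp [hdK, hde]
  intro K hnd hcov d
  rw [key K hnd d]
  by_cases hdK : d ∈ K
  · rw [if_pos hdK]
  · rw [if_neg hdK, List.filter_eq_nil_iff.mpr]
    intro a ha
    simp only [beq_iff_eq]
    intro h
    exact hdK (h ▸ hcov a ha)

theorem pv_sorted_eq_flat {α : Type} (k : α → String) (xs : List α) (K : List String)
    (hK : K.Pairwise (· < ·)) (hcov : ∀ c ∈ xs, k c ∈ K) :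
    PySem.List.sorted xs k = K.flatMap (fun d => xs.filter (fun c => k c == d)) := by
  apply pv_eq_of_sorted_filters k
  · exact PySem.List.sorted_pairwise xs k
  · exact pv_flat_pairwise k xs K hK
  · intro d
    rw [pv_filter_sorted, pv_filter_flat k xs K (hK.imp ne_of_lt) hcov d]

theorem pv_enum_map_snd {α : Type} (xs : List α) (s : Int) :
    (PySem.List.enumerate xs s).map (fun p => p.2) = xs := by
  induction xs generalizing s with
  | nil => simp [PySem.List.enumerate_nil]
  | cons x xs ih => rw [PySem.List.enumerate_cons, List.map_cons, ih]

theorem pv_enum_get (xs : List (List (String × String))) :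
    ∀ p ∈ PySem.List.enumerate xs 0, PySem.List.pyGetD xs p.1 [] = p.2 := by
  intro p hp
  rw [PySem.List.enumerate_eq_zipIdx_map] at hp
  obtain ⟨q, hq, rfl⟩ := List.mem_map.mp hp
  obtain ⟨a, i⟩ := q
  obtain ⟨hk, hlt, hval⟩ := List.mem_zipIdx (by exact hq)
  simp only [Nat.zero_add] at hlt
  simp only []
  rw [PySem.List.pyGetD_eq_getElem xs [] (by omega) (by simpa using hlt)]
  simp only [Nat.sub_zero] at hval
  rw [hval]
  congr 1
  omega

theorem pv_main (xs : List (List (String × String))) :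
    get_sorted_courses_info xs = get_sorted_courses_info_alt xs := by
  unfold get_sorted_courses_info get_sorted_courses_info_alt
  simp only [PySem.List.foldl_append_singleton_eq_map, PySem.List.foldl_append_eq_flatMap,
    List.nil_append]
  -- name the dict
  set D := (PySem.List.enumerate xs).foldl
      (fun d p => d.modify (pvDur p.2) [] (fun v => v ++ [p.1])) PySem.Dict.empty with hD
  have hfold : (List.foldl (fun (d : PySem.Dict String (List Int)) (q : String × Int) =>
        d.modify q.1 [] fun v => v ++ [q.2]) PySem.Dict.empty
        ((PySem.List.enumerate xs).map (fun p => (pvDur p.2, p.1)))) = D := by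
    rw [List.foldl_map]
  have hgetD : ∀ dur, D.getD dur [] =
      ((PySem.List.enumerate xs).filter (fun p => pvDur p.2 == dur)).map (fun p => p.1) := by
    intro dur
    rw [← hfold, PySem.Dict.getD_foldl_modify_append, List.filter_map, List.map_map]
    simp [Function.comp_def]
  have hkeys : D.keys = PySem.Set.ofList ((PySem.List.enumerate xs).map (fun p => pvDur p.2)) := by
    rw [hD, PySem.Set.ofList_eq_foldl]
    exact PySem.Dict.keys_foldl_modify_key (PySem.List.enumerate xs) (fun p => pvDur p.2)
      [] (fun _ p v => v ++ [p.1]) PySem.Dict.empty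
  have hnodup : D.keys.Nodup := by
    rw [hD]
    exact PySem.Dict.nodup_keys_foldl_modify_key (PySem.List.enumerate xs) (fun p => pvDur p.2)
      [] (fun _ p v => v ++ [p.1]) PySem.Dict.empty (by rw [PySem.Dict.keys_empty]; exact List.nodup_nil)
  set K := PySem.List.sorted D.keys (fun s => s) with hK
  have hKnodup : K.Nodup := ((PySem.List.sorted_perm D.keys (fun s => s) false).nodup_iff).mpr hnodup
  have hKlt : K.Pairwise (· < ·) :=
    ((PySem.List.sorted_pairwise D.keys (fun s => s)).and hKnodup).imp
      (fun h => lt_of_le_of_ne h.1 h.2)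
  have hcov : ∀ c ∈ xs, pvDur c ∈ K := by
    intro c hc
    rw [hK, PySem.List.mem_sorted, hkeys, PySem.Set.mem_ofList]
    obtain ⟨p, hp, hpc⟩ := List.mem_map.mp ((pv_enum_map_snd xs 0) ▸ hc)
    exact List.mem_map.mpr ⟨p, hp, by rw [hpc]⟩
  have hbucket : ∀ dur,
      (((PySem.List.enumerate xs).filter (fun p => pvDur p.2 == dur)).map (fun p => p.1)).map
        (fun idx => pvTitle (PySem.List.pyGetD xs idx []) ++ " - " ++ dur ++ " месяцев") =
      (xs.filter (fun c => pvDur c == dur)).map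
        (fun course => pvTitle course ++ " - " ++ pvDur course ++ " месяцев") := by
    intro dur
    rw [List.map_map]
    rw [List.map_congr_left (g := fun p : Int × List (String × String) =>
        pvTitle p.2 ++ " - " ++ pvDur p.2 ++ " месяцев") ?_]
    · conv_rhs => rw [← pv_enum_map_snd xs 0]
      rw [List.filter_map, List.map_map]
      simp [Function.comp_def]
    · intro p hp
      have hmem := List.mem_filter.mp hp
      have hdur : pvDur p.2 = dur := by simpa using hmem.2
      simp only [Function.comp_def]
      rw [pv_enum_get xs p hmem.1, hdur]
  simp only [hgetD, hbucket]
  rw [pv_sorted_eq_flat pvDur xs K hKlt hcov, List.map_flatMap]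

-- ===== VERDICT (by name: the statement is the Claim_ definition above) =====
theorem get_sorted_courses_info_spec : Claim_equal_get_sorted_courses_info := by
  intro courses_list _ _
  unfold Spec_get_sorted_courses_info
  exact pv_main courses_list
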